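-- pv_equiv track=rewrite | github.com/EconForge/interpolation.py | interpolation/multilinear/fungen.py | gen_tensor_reduction
-- ===== SOURCE A (Python) =====
-- def gen_tensor_reduction(X, symbs, inds=[]):
--     """
--     Generate a matrix.
--
--     Args:
--         X: (todo): write your description
--         symbs: (todo): write your description
--         inds: (todo): write your description
--     """
--     if len(symbs) == 0:
--         return '{}[{}]'.format(X, str.join('][',[str(e) for e in inds]))
--     else:
--         h = symbs[0]
--         q = symbs[1:]
--         exprs = [  '{}*({})'.format(h if i==1 else '(1-{})'.format(h),gen_tensor_reduction(X, q,inds + [i])) for i in range(2)]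
--         return str.join( ' + ', exprs )
-- ===== SOURCE B (Python) =====
-- def gen_tensor_reduction(X, symbs, inds=[]):
--     # Bottom-up: enumerate all 2^n leaf strings, then collapse adjacent pairs
--     # once per symbol, from the last symbol to the first.
--     suffixes = [[]]
--     for _ in symbs:
--         suffixes = [s + [b] for s in suffixes for b in (0, 1)]
--     exprs = ['{}[{}]'.format(X, ']['.join(str(e) for e in inds + s)) for s in suffixes]
--     for h in reversed(symbs):
--         exprs = ['(1-{})*({}) + {}*({})'.format(h, lo, h, hi)
--                  for lo, hi in zip(exprs[0::2], exprs[1::2])]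
--     return exprs[0]
-- ===== Notes on version B (the rewrite author's own statement) =====
-- stated objective: alternative
-- what changed: Replaces the top-down recursion by a bottom-up construction: enumerate all 2^n leaf strings X[...inds+bits...] first, then collapse adjacent pairs once per symbol from last to first until one expression remains.
import Mathlib
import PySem

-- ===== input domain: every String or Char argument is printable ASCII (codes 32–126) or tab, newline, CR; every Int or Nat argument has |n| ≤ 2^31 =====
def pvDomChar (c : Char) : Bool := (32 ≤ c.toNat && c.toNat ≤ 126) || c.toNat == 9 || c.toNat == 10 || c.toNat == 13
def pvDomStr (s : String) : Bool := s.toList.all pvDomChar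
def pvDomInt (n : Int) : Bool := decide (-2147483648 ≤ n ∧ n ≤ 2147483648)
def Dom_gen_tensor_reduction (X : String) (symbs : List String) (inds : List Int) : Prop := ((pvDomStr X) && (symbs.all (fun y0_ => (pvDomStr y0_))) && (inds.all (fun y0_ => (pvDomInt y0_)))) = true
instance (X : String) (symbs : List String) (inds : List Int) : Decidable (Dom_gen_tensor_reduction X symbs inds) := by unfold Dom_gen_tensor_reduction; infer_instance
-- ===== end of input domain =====

-- B builds the same nested expression bottom-up (2^n leaves, then pairwise
-- collapse once per symbol) instead of by top-down recursion; objective: alternative.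

-- ===== PORT A =====
def gen_tensor_reduction (X : String) (symbs : List String) (inds : List Int) : String :=
  match symbs with
  | [] => X ++ "[" ++ PySem.Str.join "][" (inds.map PySem.Int.toStr) ++ "]"
  | h :: q =>
    "(1-" ++ h ++ ")*(" ++ gen_tensor_reduction X q (inds ++ [0]) ++ ") + "
      ++ h ++ "*(" ++ gen_tensor_reduction X q (inds ++ [1]) ++ ")"

-- ===== PORT B =====
-- leaf string '{X}[{...}]'
def pvLeaf (X : String) (ixs : List Int) : String :=
  X ++ "[" ++ PySem.Str.join "][" (ixs.map PySem.Int.toStr) ++ "]"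

-- one collapse pass: pairwise walk over the list, consuming pairs in order
-- (= zip(exprs[0::2], exprs[1::2]) in Source B; exact for the even-length lists that occur)
def pvCombine (h : String) : List String → List String
  | a :: b :: rest =>
      ("(1-" ++ h ++ ")*(" ++ a ++ ") + " ++ h ++ "*(" ++ b ++ ")") :: pvCombine h rest
  | _ => []

def gen_tensor_reduction_alt (X : String) (symbs : List String) (inds : List Int) : String :=
  let suffixes := symbs.foldl
    (fun acc _ => acc.flatMap (fun s => [s ++ [(0 : Int)], s ++ [1]])) [([] : List Int)]
  let exprs := suffixes.map (fun s => pvLeaf X (inds ++ s))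
  let final := symbs.reverse.foldl (fun es h => pvCombine h es) exprs
  final.headD ""

-- ===== PRECONDITION & SPEC =====
def Spec_gen_tensor_reduction (X : String) (symbs : List String) (inds : List Int) (out : String) : Prop := out = gen_tensor_reduction_alt X symbs inds
instance (X : String) (symbs : List String) (inds : List Int) (out : String) : Decidable (Spec_gen_tensor_reduction X symbs inds out) := by unfold Spec_gen_tensor_reduction; infer_instance

-- ===== CLAIM (what is proved, stated in full; the proofs are below) =====
def Claim_equal_gen_tensor_reduction : Prop := ∀ (X : String) (symbs : List String) (inds : List Int), Dom_gen_tensor_reduction X symbs inds → Spec_gen_tensor_reduction X symbs inds (gen_tensor_reduction X symbs inds)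

-- ===== LEMMAS AND PROOFS =====

def pvStep (l : List (List Int)) : List (List Int) :=
  l.flatMap (fun s => [s ++ [(0 : Int)], s ++ [1]])

theorem pvFoldl_step (symbs : List String) (acc : List (List Int)) :
    symbs.foldl (fun a _ => pvStep a) acc = pvStep^[symbs.length] acc := by
  induction symbs generalizing acc with
  | nil => rfl
  | cons h q ih => simp [List.foldl_cons, ih, Function.iterate_succ_apply]

theorem pvStep_map_cons (c : Int) (l : List (List Int)) :
    pvStep (l.map (fun s => c :: s)) = (pvStep l).map (fun s => c :: s) := by
  induction l with
  | nil => rfl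
  | cons a t ih => simp [pvStep, List.flatMap_cons] at ih ⊢; simp [ih]

theorem pvIter_map_cons (n : ℕ) (c : Int) (l : List (List Int)) :
    pvStep^[n] (l.map (fun s => c :: s)) = (pvStep^[n] l).map (fun s => c :: s) := by
  induction n generalizing l with
  | zero => rfl
  | succ n ih => simp [Function.iterate_succ_apply, pvStep_map_cons, ih]

theorem pvIter_split (n : ℕ) :
    pvStep^[n + 1] [[]] =
      (pvStep^[n] [([] : List Int)]).map (fun s => (0 : Int) :: s)
        ++ (pvStep^[n] [([] : List Int)]).map (fun s => (1 : Int) :: s) := by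
  have h0 : pvStep [([] : List Int)] = [[(0 : Int)], [(1 : Int)]] := rfl
  have hsplit : ∀ m (l1 l2 : List (List Int)),
      pvStep^[m] (l1 ++ l2) = pvStep^[m] l1 ++ pvStep^[m] l2 := by
    intro m
    induction m with
    | zero => intro _ _; rfl
    | succ m ih =>
      intro l1 l2
      have hstep : pvStep (l1 ++ l2) = pvStep l1 ++ pvStep l2 := by
        simp [pvStep, List.flatMap_append]
      rw [Function.iterate_succ_apply, Function.iterate_succ_apply,
        Function.iterate_succ_apply, hstep, ih]
  calc pvStep^[n + 1] [([] : List Int)]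
      = pvStep^[n] [[(0 : Int)], [(1 : Int)]] := by
        rw [Function.iterate_succ_apply, h0]
    _ = pvStep^[n] [[(0 : Int)]] ++ pvStep^[n] [[(1 : Int)]] := by
        have := hsplit n [[(0 : Int)]] [[(1 : Int)]]; simpa using this
    _ = _ := by
        have h2 : ([[(0 : Int)]] : List (List Int))
            = ([([] : List Int)]).map (fun s => (0 : Int) :: s) := rfl
        have h3 : ([[(1 : Int)]] : List (List Int))
            = ([([] : List Int)]).map (fun s => (1 : Int) :: s) := rfl
        rw [h2, h3, pvIter_map_cons, pvIter_map_cons]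

theorem pvIter_length (n : ℕ) : (pvStep^[n] [([] : List Int)]).length = 2 ^ n := by
  induction n with
  | zero => rfl
  | succ n ih =>
    rw [Function.iterate_succ_apply']
    have : ∀ l : List (List Int), (pvStep l).length = 2 * l.length := by
      intro l; induction l with
      | nil => rfl
      | cons a t ih2 => simp [pvStep, List.flatMap_cons] at ih2 ⊢; omega
    rw [this, ih]; ring

theorem pvCombine_length (h : String) : ∀ es : List String,
    (pvCombine h es).length = es.length / 2
  | [] => rfl
  | [a] => by simp [pvCombine]
  | a :: b :: r => by
      simp only [pvCombine, List.length_cons, pvCombine_length h r]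
      omega

theorem pvCombine_append (h : String) : ∀ (es1 es2 : List String),
    es1.length % 2 = 0 →
    pvCombine h (es1 ++ es2) = pvCombine h es1 ++ pvCombine h es2
  | [], es2, _ => by simp [pvCombine]
  | [a], es2, hp => by simp at hp
  | a :: b :: r, es2, hp => by
      simp only [List.cons_append, pvCombine, List.length_cons] at hp ⊢
      rw [pvCombine_append h r es2 (by omega)]

theorem pvFoldr_length : ∀ (q : List String) (es : List String),
    (q.foldr pvCombine es).length = es.length / 2 ^ q.length
  | [], es => by simp
  | h :: q, es => by
      simp only [List.foldr_cons, pvCombine_length, pvFoldr_length q es,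
        List.length_cons, pow_succ]
      rw [Nat.div_div_eq_div_mul]

theorem pvFoldr_split : ∀ (q : List String) (es1 es2 : List String),
    2 ^ q.length ∣ es1.length →
    q.foldr pvCombine (es1 ++ es2) = q.foldr pvCombine es1 ++ q.foldr pvCombine es2
  | [], es1, es2, _ => by simp
  | h :: q, es1, es2, hd => by
      obtain ⟨c, hc⟩ := hd
      have hd' : 2 ^ q.length ∣ es1.length := by
        refine ⟨2 * c, ?_⟩; rw [hc, List.length_cons, pow_succ]; ring
      simp only [List.foldr_cons]
      rw [pvFoldr_split q es1 es2 hd']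
      refine pvCombine_append h _ _ ?_
      have hq : (2 : ℕ) ^ (q.length + 1) * c / 2 ^ q.length = 2 * c := by
        rw [pow_succ, Nat.mul_assoc, Nat.mul_div_cancel_left _ (Nat.two_pow_pos _)]
      rw [pvFoldr_length, hc, List.length_cons, hq]
      omega

theorem pvMain (symbs : List String) : ∀ (X : String) (inds : List Int),
    symbs.foldr pvCombine
        ((pvStep^[symbs.length] [([] : List Int)]).map (fun s => pvLeaf X (inds ++ s)))
      = [gen_tensor_reduction X symbs inds] := by
  induction symbs with
  | nil =>
    intro X inds
    simp [pvLeaf, gen_tensor_reduction]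
  | cons h q ih =>
    intro X inds
    rw [List.length_cons, pvIter_split, List.map_append, List.map_map, List.map_map,
      List.foldr_cons]
    have hmap0 : ((pvStep^[q.length] [([] : List Int)]).map
        ((fun s => pvLeaf X (inds ++ s)) ∘ fun s => (0 : Int) :: s))
        = (pvStep^[q.length] [([] : List Int)]).map (fun s => pvLeaf X ((inds ++ [0]) ++ s)) := by
      apply List.map_congr_left; intro s _; simp [Function.comp]
    have hmap1 : ((pvStep^[q.length] [([] : List Int)]).map
        ((fun s => pvLeaf X (inds ++ s)) ∘ fun s => (1 : Int) :: s))
        = (pvStep^[q.length] [([] : List Int)]).map (fun s => pvLeaf X ((inds ++ [1]) ++ s)) := by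
      apply List.map_congr_left; intro s _; simp [Function.comp]
    rw [hmap0, hmap1, pvFoldr_split q _ _ (by rw [List.length_map, pvIter_length]),
      ih X (inds ++ [0]), ih X (inds ++ [1])]
    simp [pvCombine, gen_tensor_reduction]

-- ===== VERDICT (by name: the statement is the Claim_ definition above) =====
theorem gen_tensor_reduction_spec : Claim_equal_gen_tensor_reduction := by
  intro X symbs inds _
  unfold Spec_gen_tensor_reduction
  show gen_tensor_reduction X symbs inds =
    (symbs.reverse.foldl (fun es h => pvCombine h es)
      ((symbs.foldl (fun acc _ => acc.flatMap (fun s => [s ++ [(0 : Int)], s ++ [1]]))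
          [([] : List Int)]).map (fun s => pvLeaf X (inds ++ s)))).headD ""
  have hfold : symbs.foldl
      (fun acc (_ : String) => acc.flatMap (fun s => [s ++ [(0 : Int)], s ++ [1]]))
      [([] : List Int)] = pvStep^[symbs.length] [([] : List Int)] :=
    pvFoldl_step symbs _
  rw [hfold, List.foldl_reverse]
  have : (fun (es : List String) (h : String) => pvCombine h es) = fun es h => pvCombine h es := rfl
  rw [show (symbs.foldr (fun x y => pvCombine x y)
      ((pvStep^[symbs.length] [([] : List Int)]).map (fun s => pvLeaf X (inds ++ s))))
      = [gen_tensor_reduction X symbs inds] from pvMain symbs X inds]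
  rfl
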